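-- pv_equiv track=rewrite | github.com/Draco3310/Gal-Friday2 | src/gal_friday/config_manager.py | _is_valid_trading_pair
-- ===== SOURCE A (Python) =====
-- def _is_valid_trading_pair(pair: str) -> bool:
--     """Validates if a string is a properly formatted trading pair."""
--     if not isinstance(pair, str):
--         return False
--     if "/" not in pair:
--         return False
--     parts = pair.split("/")
--     if len(parts) != 2:
--         return False
--     if not all(p.strip() for p in parts):
--         return False
--     return True
-- ===== SOURCE B (Python) =====
-- def _is_valid_trading_pair(pair: str) -> bool:
--     """Single pass over the characters: count slashes and record whether a
--     non-whitespace character was seen before / after the first slash."""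
--     if not isinstance(pair, str):
--         return False
--     slashes = 0
--     left_ok = False
--     right_ok = False
--     for ch in pair:
--         if ch == "/":
--             slashes += 1
--         elif not ch.isspace():
--             if slashes == 0:
--                 left_ok = True
--             else:
--                 right_ok = True
--     return slashes == 1 and left_ok and right_ok
-- ===== Notes on version B (the rewrite author's own statement) =====
-- stated objective: alternative
-- what changed: Replaces split('/') + per-part strip() with a single character pass that counts slashes and tracks a non-whitespace flag for each side, building no intermediate lists.
import Mathlib
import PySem

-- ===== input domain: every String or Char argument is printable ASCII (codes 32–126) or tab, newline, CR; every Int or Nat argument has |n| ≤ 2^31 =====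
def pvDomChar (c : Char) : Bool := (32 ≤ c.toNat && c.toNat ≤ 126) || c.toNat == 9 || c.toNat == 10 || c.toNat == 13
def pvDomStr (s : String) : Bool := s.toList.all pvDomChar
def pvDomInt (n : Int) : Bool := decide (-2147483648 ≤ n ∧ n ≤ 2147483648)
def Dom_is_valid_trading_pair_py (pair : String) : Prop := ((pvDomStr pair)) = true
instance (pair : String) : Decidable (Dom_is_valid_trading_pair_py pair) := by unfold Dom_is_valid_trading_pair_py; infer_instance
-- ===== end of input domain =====

-- B replaces split('/') + per-part strip() with one character pass (slash counter + a
-- seen-non-whitespace flag per side); same O(n) cost, no intermediate lists.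

-- ===== PORT A =====
-- (the `isinstance(pair, str)` guard cannot fire for a String argument)
def is_valid_trading_pair_py (pair : String) : Bool :=
  if PySem.Str.isIn "/" pair = false then false
  else
    let parts := PySem.Chars.splitOn pair.toList "/".toList
    if parts.length ≠ 2 then false
    else if ¬ ((parts.all fun p => !(PySem.Chars.strip p).isEmpty) = true) then false
    else true

-- ===== PORT B =====
def altStep (st : Nat × Bool × Bool) (c : Char) : Nat × Bool × Bool :=
  if c = '/' then (st.1 + 1, st.2.1, st.2.2)
  else if PySem.Chars.isspace c then st
  else if st.1 = 0 then (st.1, true, st.2.2)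
  else (st.1, st.2.1, true)

def is_valid_trading_pair_py_alt (pair : String) : Bool :=
  let st := pair.toList.foldl altStep (0, false, false)
  st.1 == 1 && st.2.1 && st.2.2

-- ===== PRECONDITION & SPEC =====
def Spec_is_valid_trading_pair_py (pair : String) (out : Bool) : Prop := out = is_valid_trading_pair_py_alt pair
instance (pair : String) (out : Bool) : Decidable (Spec_is_valid_trading_pair_py pair out) := by unfold Spec_is_valid_trading_pair_py; infer_instance

-- ===== CLAIM (what is proved, stated in full; the proofs are below) =====
def Claim_equal_is_valid_trading_pair_py : Prop := ∀ (pair : String), Dom_is_valid_trading_pair_py pair → Spec_is_valid_trading_pair_py pair (is_valid_trading_pair_py pair)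

-- ===== LEMMAS AND PROOFS =====

-- proof-only helpers
def hasNS (p : List Char) : Bool := !(p.all PySem.Chars.isspace)
def qNS (c : Char) : Bool := decide (c ≠ '/') && !(PySem.Chars.isspace c)

/-- Structural model of Python's `split("/")`. -/
def spineSplit : List Char → List (List Char)
  | [] => [[]]
  | c :: rest =>
    let ps := spineSplit rest
    if c = '/' then [] :: ps
    else (c :: ps.headI) :: ps.tail

def mapFirst (f : List Char → List Char) : List (List Char) → List (List Char)
  | [] => []
  | p :: ps => f p :: ps

lemma spineSplit_ne_nil (cs : List Char) : spineSplit cs ≠ [] := by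
  cases cs with
  | nil => simp [spineSplit]
  | cons c rest => simp only [spineSplit]; split_ifs <;> simp

lemma spineSplit_cons' (cs : List Char) : ∃ p ps, spineSplit cs = p :: ps := by
  cases hsp : spineSplit cs with
  | nil => exact absurd hsp (spineSplit_ne_nil cs)
  | cons p ps => exact ⟨p, ps, rfl⟩

lemma mapFirst_id (ps : List (List Char)) : mapFirst (fun x => x) ps = ps := by
  cases ps <;> simp [mapFirst]

lemma go_eq : ∀ (fuel : Nat) (cs cur : List Char) (acc : List (List Char)),
    cs.length < fuel →
    PySem.Chars.splitOn.go ['/'] fuel cs cur acc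
      = acc.reverse ++ mapFirst (fun x => cur.reverse ++ x) (spineSplit cs) := by
  intro fuel
  induction fuel with
  | zero => intro cs cur acc h; omega
  | succ f ih =>
    intro cs cur acc h
    cases cs with
    | nil =>
      rw [PySem.Chars.splitOn.go.eq_def]
      simp [spineSplit, mapFirst]
    | cons c rest =>
      rw [PySem.Chars.splitOn.go.eq_def]
      by_cases hc : c = '/'
      · subst hc
        have hpre : List.isPrefixOf ['/'] ('/' :: rest) = true := by simp [List.isPrefixOf]
        simp only [hpre, if_pos, List.length_singleton, List.drop_succ_cons, List.drop_zero]
        rw [ih rest [] (cur.reverse :: acc) (by simp at h; omega)]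
        obtain ⟨p, ps, hps⟩ := spineSplit_cons' rest
        simp [spineSplit, mapFirst, hps]
      · have hpre : List.isPrefixOf ['/'] (c :: rest) = false := by
          simp [List.isPrefixOf]; exact fun h' => absurd h'.symm hc
        simp only [hpre, Bool.false_eq_true, if_neg, not_false_iff]
        rw [ih rest (c :: cur) acc (by simp at h; omega)]
        obtain ⟨p, ps, hps⟩ := spineSplit_cons' rest
        simp [spineSplit, hc, hps, mapFirst]

lemma splitOn_eq_spine (cs : List Char) :
    PySem.Chars.splitOn cs ['/'] = spineSplit cs := by
  unfold PySem.Chars.splitOn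
  rw [go_eq (cs.length + 1) cs [] [] (by omega)]
  simp [mapFirst_id]

lemma length_spineSplit (cs : List Char) :
    (spineSplit cs).length = cs.count '/' + 1 := by
  induction cs with
  | nil => simp [spineSplit]
  | cons c rest ih =>
    obtain ⟨p, ps, hps⟩ := spineSplit_cons' rest
    by_cases hc : c = '/'
    · subst hc; simp [spineSplit, List.count_cons, ih]
    · simp [spineSplit, hc, hps, List.count_cons] at ih ⊢; omega

lemma spineSplit_of_count_zero (cs : List Char) (h : cs.count '/' = 0) :
    spineSplit cs = [cs] := by
  induction cs with
  | nil => simp [spineSplit]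
  | cons c rest ih =>
    simp only [List.count_cons] at h
    have hc : c ≠ '/' := by
      intro hc; subst hc; simp at h
    have h0 : rest.count '/' = 0 := by omega
    simp [spineSplit, hc, ih h0]

lemma spineSplit_of_mem (cs : List Char) (h : '/' ∈ cs) :
    ∃ b, cs.dropWhile (· ≠ '/') = '/' :: b ∧
      spineSplit cs = (cs.takeWhile (· ≠ '/')) :: spineSplit b := by
  induction cs with
  | nil => simp at h
  | cons c rest ih =>
    by_cases hc : c = '/'
    · subst hc
      exact ⟨rest, by simp [List.dropWhile], by simp [spineSplit, List.takeWhile]⟩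
    · have hm : '/' ∈ rest := by
        rcases List.mem_cons.mp h with h1 | h1
        · exact absurd h1.symm hc
        · exact h1
      obtain ⟨b, hb1, hb2⟩ := ih hm
      refine ⟨b, ?_, ?_⟩
      · simpa [List.dropWhile, hc] using hb1
      · simp [spineSplit, hc, hb2, List.takeWhile]

lemma isIn_slash_iff (cs : List Char) :
    PySem.Chars.isIn ['/'] cs = true ↔ '/' ∈ cs := by
  rw [PySem.Chars.isIn_iff_infix]
  constructor
  · rintro ⟨s, t, rfl⟩; simp
  · intro hm
    obtain ⟨s, t, rfl⟩ := List.append_of_mem hm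
    exact ⟨s, t, by simp⟩

lemma strip_isEmpty (p : List Char) :
    (PySem.Chars.strip p).isEmpty = p.all PySem.Chars.isspace := by
  simp only [PySem.Chars.strip, PySem.Chars.rstrip, PySem.Chars.lstrip]
  cases hall : p.all PySem.Chars.isspace with
  | true =>
    have : p.dropWhile PySem.Chars.isspace = [] :=
      List.dropWhile_eq_nil_iff.mpr (fun x hx => List.all_eq_true.mp hall x hx)
    simp [this]
  | false =>
    have hne : p.dropWhile PySem.Chars.isspace ≠ [] := by
      intro hnil
      have : p.all PySem.Chars.isspace = true := by
        have h1 : (p.takeWhile PySem.Chars.isspace).all PySem.Chars.isspace = true :=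
          List.all_eq_true.mpr (fun x hx => List.mem_takeWhile_imp hx)
        have h2 : p = p.takeWhile PySem.Chars.isspace := by
          conv_lhs => rw [← List.takeWhile_append_dropWhile (p := PySem.Chars.isspace) (l := p)]
          rw [hnil, List.append_nil]
        rw [h2]; exact h1
      simp [this] at hall
    have hhead : PySem.Chars.isspace ((p.dropWhile PySem.Chars.isspace).head hne) = false :=
      List.head_dropWhile_not PySem.Chars.isspace hne
    have hmem : (p.dropWhile PySem.Chars.isspace).head hne ∈
        (p.dropWhile PySem.Chars.isspace).reverse := by
      simp [List.head_mem]
    have hne2 : ((p.dropWhile PySem.Chars.isspace).reverse.dropWhile PySem.Chars.isspace) ≠ [] := by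
      intro hnil
      have := List.dropWhile_eq_nil_iff.mp hnil _ hmem
      simp [hhead] at this
    simp [hne2]

lemma altStep_slash (st : Nat × Bool × Bool) : altStep st '/' = (st.1 + 1, st.2.1, st.2.2) := by
  simp [altStep]

lemma altStep_space {c : Char} (hc : c ≠ '/') (hs : PySem.Chars.isspace c = true)
    (st : Nat × Bool × Bool) : altStep st c = st := by
  simp [altStep, hc, hs]

lemma altStep_ns_zero {c : Char} (hc : c ≠ '/') (hs : PySem.Chars.isspace c = false)
    (l r : Bool) : altStep (0, l, r) c = (0, true, r) := by
  simp [altStep, hc, hs]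

lemma altStep_ns_pos {c : Char} (hc : c ≠ '/') (hs : PySem.Chars.isspace c = false)
    {n : Nat} (hn : n ≠ 0) (l r : Bool) : altStep (n, l, r) c = (n, l, true) := by
  simp [altStep, hc, hs, hn]

lemma fold_pos (cs : List Char) : ∀ (n : Nat) (l r : Bool), n ≠ 0 →
    cs.foldl altStep (n, l, r) = (n + cs.count '/', l, r || cs.any qNS) := by
  induction cs with
  | nil => intro n l r _; simp
  | cons c rest ih =>
    intro n l r hn
    by_cases hc : c = '/'
    · subst hc
      rw [List.foldl_cons, altStep_slash]
      rw [ih (n + 1) l r (by omega)]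
      simp [List.count_cons, List.any_cons, qNS, Prod.mk.injEq]
      all_goals omega
    · have hcnt : List.count '/' (c :: rest) = List.count '/' rest := by
        simp [List.count_cons, hc]
      cases hs : PySem.Chars.isspace c with
      | true =>
        rw [List.foldl_cons, altStep_space hc hs, ih n l r hn]
        simp [hcnt, List.any_cons, qNS, hs]
      | false =>
        rw [List.foldl_cons, altStep_ns_pos hc hs hn, ih n l true hn]
        simp [hcnt, List.any_cons, qNS, hs, hc]

lemma fold_zero (cs : List Char) : ∀ (l r : Bool),
    cs.foldl altStep (0, l, r)
      = (cs.count '/', l || hasNS (cs.takeWhile (· ≠ '/')),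
         r || (cs.dropWhile (· ≠ '/')).any qNS) := by
  induction cs with
  | nil => intro l r; simp [hasNS]
  | cons c rest ih =>
    intro l r
    by_cases hc : c = '/'
    · subst hc
      rw [List.foldl_cons, altStep_slash]
      rw [fold_pos rest 1 l r (by omega)]
      simp [List.count_cons, List.takeWhile_cons, List.dropWhile_cons, hasNS,
        List.any_cons, qNS, Prod.mk.injEq]
      all_goals omega
    · have hcnt : List.count '/' (c :: rest) = List.count '/' rest := by
        simp [List.count_cons, hc]
      cases hs : PySem.Chars.isspace c with
      | true =>
        rw [List.foldl_cons, altStep_space hc hs, ih l r]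
        simp [hcnt, List.takeWhile_cons, List.dropWhile_cons, hc, hasNS, hs]
      | false =>
        rw [List.foldl_cons, altStep_ns_zero hc hs, ih true r]
        simp [hcnt, List.takeWhile_cons, List.dropWhile_cons, hc, hasNS, hs]

lemma any_qNS_of_count_zero (b : List Char) (h : b.count '/' = 0) :
    b.any qNS = hasNS b := by
  induction b with
  | nil => simp [hasNS]
  | cons c rest ih =>
    simp only [List.count_cons] at h
    have hc : c ≠ '/' := by intro hc; subst hc; simp at h
    have h0 : rest.count '/' = 0 := by omega
    cases hs : PySem.Chars.isspace c <;>
      simp [List.any_cons, qNS, hc, ih h0, hasNS, List.all_cons, hs]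

lemma main_list (cs : List Char) :
    (if PySem.Chars.isIn ['/'] cs = false then false
     else if (PySem.Chars.splitOn cs ['/']).length ≠ 2 then false
     else if ¬ (((PySem.Chars.splitOn cs ['/']).all fun p => !(PySem.Chars.strip p).isEmpty) = true) then false
     else true)
    = ((cs.foldl altStep (0, false, false)).1 == 1
        && (cs.foldl altStep (0, false, false)).2.1
        && (cs.foldl altStep (0, false, false)).2.2) := by
  rw [fold_zero cs false false]
  dsimp only
  rcases hk : cs.count '/' with _ | _ | k
  · -- no slash: both sides false
    have hnm : '/' ∉ cs := List.count_eq_zero.mp hk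
    have hfalse : PySem.Chars.isIn ['/'] cs = false := by
      cases hb : PySem.Chars.isIn ['/'] cs with
      | false => rfl
      | true => exact absurd ((isIn_slash_iff cs).mp hb) hnm
    rw [hfalse, if_pos rfl]
    simp
  · -- exactly one slash
    have hm : '/' ∈ cs := List.count_pos_iff.mp (by omega)
    have hisin : PySem.Chars.isIn ['/'] cs = true := (isIn_slash_iff cs).mpr hm
    obtain ⟨b, hb1, hb2⟩ := spineSplit_of_mem cs hm
    have hcnt : (cs.takeWhile (· ≠ '/')).count '/' = 0 := by
      apply List.count_eq_zero.mpr
      intro hx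
      have := List.mem_takeWhile_imp hx
      simp at this
    have hsplit_cs : cs = cs.takeWhile (· ≠ '/') ++ '/' :: b := by
      conv_lhs => rw [← List.takeWhile_append_dropWhile (p := (· ≠ '/')) (l := cs)]
      rw [hb1]
    have hbcnt : b.count '/' = 0 := by
      have h2 : cs.count '/'
          = (cs.takeWhile (· ≠ '/')).count '/' + (1 + b.count '/') := by
        conv_lhs => rw [hsplit_cs]
        simp [List.count_append]
        all_goals omega
      omega
    have hspine : spineSplit cs = [cs.takeWhile (· ≠ '/'), b] := by
      rw [hb2, spineSplit_of_count_zero b hbcnt]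
    rw [hisin, if_neg (by simp), splitOn_eq_spine, hspine]
    rw [if_neg (by simp)]
    have hA : ([cs.takeWhile (· ≠ '/'), b].all fun p => !(PySem.Chars.strip p).isEmpty)
        = (hasNS (cs.takeWhile (· ≠ '/')) && hasNS b) := by
      simp [strip_isEmpty, hasNS]
    rw [hA, hb1]
    have hq : (('/' :: b).any qNS) = hasNS b := by
      simp [List.any_cons, qNS, any_qNS_of_count_zero b hbcnt]
    rw [hq]
    cases hasNS (cs.takeWhile (· ≠ '/')) <;> cases hasNS b <;> simp
  · -- two or more slashes: both sides false
    have hm : '/' ∈ cs := List.count_pos_iff.mp (by omega)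
    have hisin : PySem.Chars.isIn ['/'] cs = true := (isIn_slash_iff cs).mpr hm
    rw [hisin, if_neg (by simp), splitOn_eq_spine]
    rw [if_pos (by rw [length_spineSplit, hk]; omega)]
    have hb : ((k + 1 + 1 : Nat) == 1) = false := beq_eq_false_iff_ne.mpr (by omega)
    rw [hb]
    simp

lemma main_eq (pair : String) :
    is_valid_trading_pair_py pair = is_valid_trading_pair_py_alt pair := by
  simp only [is_valid_trading_pair_py, is_valid_trading_pair_py_alt]
  have h1 : PySem.Str.isIn "/" pair = PySem.Chars.isIn ['/'] pair.toList := rfl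
  have h2 : "/".toList = ['/'] := rfl
  rw [h1, h2]
  exact main_list pair.toList

-- ===== VERDICT (by name: the statement is the Claim_ definition above) =====
theorem is_valid_trading_pair_py_spec : Claim_equal_is_valid_trading_pair_py := by
  intro pair _
  unfold Spec_is_valid_trading_pair_py
  exact main_eq pair
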